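-- pv_equiv track=rewrite | github.com/Shuniy/Codes | rectangle_mania.py | get_coords_table
-- ===== SOURCE A (Python) =====
-- up = "up"
--
-- right = "right"
--
-- left = "left"
--
-- down = "down"
--
-- def get_coords_table(coords):
--     coords_table = {}
--
--     for coord1 in coords:
--         coord1d_directions = {
--             up : [],
--             right : [],
--             down : [],
--             left : []
--         }
--         for coord2 in coords:
--             coord2d_direction = get_coords_direction(coord1, coord2)
--             if coord2d_direction in coord1d_directions:
--                 coord1d_directions[coord2d_direction].append(coord2)
--
--         coord1_string = coord_to_string(coord1)
--         coords_table[coord1_string] = coord1d_directions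
--     return coords_table
--
-- def get_coords_direction(coord1, coord2):
--     x1, y1 = coord1
--     x2, y2 = coord2
--
--     if y2 == y1:
--         if x2 > x1:
--             return right
--         elif x2 < x1:
--             return left
--     elif x2 == x1:
--         if y2 > y1:
--             return up
--         elif y2 < y1:
--             return down
--     else:
--         return ""
--
-- def coord_to_string(coord):
--     x, y = coord
--     return str(x) + "-" + str(y)
-- ===== SOURCE B (Python) =====
-- up = "up"
-- right = "right"
-- down = "down"
-- left = "left"
--
-- def get_coords_table(coords):
--     rows = {}
--     cols = {}
--     for coord in coords:
--         x, y = coord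
--         rows.setdefault(y, []).append(coord)
--         cols.setdefault(x, []).append(coord)
--     coords_table = {}
--     for coord in coords:
--         x, y = coord
--         row = rows.get(y, [])
--         col = cols.get(x, [])
--         coords_table[str(x) + "-" + str(y)] = {
--             up: [c for c in col if c[1] > y],
--             right: [c for c in row if c[0] > x],
--             down: [c for c in col if c[1] < y],
--             left: [c for c in row if c[0] < x],
--         }
--     return coords_table
-- ===== Notes on version B (the rewrite author's own statement) =====
-- stated objective: faster
-- what changed: B replaces A's all-pairs scan (for every coord, re-scan the whole list and classify each pair by direction) with a single pass that buckets the coords by row and by column in two dicts, then builds each coord's four direction lists by filtering only its own row and column buckets.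
import Mathlib
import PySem

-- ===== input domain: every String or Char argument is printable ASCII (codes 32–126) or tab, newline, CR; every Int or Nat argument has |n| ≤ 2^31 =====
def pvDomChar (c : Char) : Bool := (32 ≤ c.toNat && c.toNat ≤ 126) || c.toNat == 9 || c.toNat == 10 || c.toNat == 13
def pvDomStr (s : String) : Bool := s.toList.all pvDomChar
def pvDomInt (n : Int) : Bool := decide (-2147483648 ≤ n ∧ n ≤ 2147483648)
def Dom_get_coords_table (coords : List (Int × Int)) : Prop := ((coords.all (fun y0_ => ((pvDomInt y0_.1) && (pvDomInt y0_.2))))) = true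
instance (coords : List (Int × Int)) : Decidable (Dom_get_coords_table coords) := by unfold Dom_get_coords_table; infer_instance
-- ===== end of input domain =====

-- B replaces A's quadratic all-pairs direction scan by bucketing the coords by row and by
-- column once, then reading each coord's four direction lists off its two buckets (objective: faster).

-- ===== PORT A =====
def get_coords_direction (coord1 coord2 : Int × Int) : Option String :=
  let x1 := coord1.1; let y1 := coord1.2
  let x2 := coord2.1; let y2 := coord2.2
  if y2 = y1 then
    (if x2 > x1 then some "right"
     else if x2 < x1 then some "left"
     else none)            -- Python falls off the function: returns None
  else if x2 = x1 then
    (if y2 > y1 then some "up"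
     else if y2 < y1 then some "down"
     else none)            -- unreachable (y2 ≠ y1 here)
  else some ""

def coord_to_string (coord : Int × Int) : String :=
  PySem.Int.toStr coord.1 ++ "-" ++ PySem.Int.toStr coord.2

def get_coords_table (coords : List (Int × Int)) : List (String × List (String × List (Int × Int))) :=
  let coords_table : PySem.Dict String (PySem.Dict String (List (Int × Int))) :=
    coords.foldl (fun coords_table coord1 =>
      let coord1d_directions : PySem.Dict String (List (Int × Int)) :=
        PySem.Dict.ofList [("up", []), ("right", []), ("down", []), ("left", [])]
      let coord1d_directions :=
        coords.foldl (fun d coord2 =>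
          match get_coords_direction coord1 coord2 with
          | some dir => if d.contains dir then d.modify dir [] (· ++ [coord2]) else d
          | none => d) coord1d_directions
      coords_table.insert (coord_to_string coord1) coord1d_directions) PySem.Dict.empty
  coords_table.items.map (fun p => (p.1, p.2.items))

-- ===== PORT B =====
def get_coords_table_alt (coords : List (Int × Int)) : List (String × List (String × List (Int × Int))) :=
  let rc : PySem.Dict Int (List (Int × Int)) × PySem.Dict Int (List (Int × Int)) :=
    coords.foldl (fun rc coord =>
      (rc.1.modify coord.2 [] (· ++ [coord]), rc.2.modify coord.1 [] (· ++ [coord])))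
      (PySem.Dict.empty, PySem.Dict.empty)
  let coords_table : PySem.Dict String (PySem.Dict String (List (Int × Int))) :=
    coords.foldl (fun coords_table coord =>
      let x := coord.1; let y := coord.2
      let row := rc.1.getD y []
      let col := rc.2.getD x []
      coords_table.insert (PySem.Int.toStr x ++ "-" ++ PySem.Int.toStr y)
        (PySem.Dict.ofList
          [("up", col.filter (fun c => decide (c.2 > y))),
           ("right", row.filter (fun c => decide (c.1 > x))),
           ("down", col.filter (fun c => decide (c.2 < y))),
           ("left", row.filter (fun c => decide (c.1 < x)))])) PySem.Dict.empty
  coords_table.items.map (fun p => (p.1, p.2.items))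

-- ===== PRECONDITION & SPEC =====
def Spec_get_coords_table (coords : List (Int × Int)) (out : List (String × List (String × List (Int × Int)))) : Prop := out = get_coords_table_alt coords
instance (coords : List (Int × Int)) (out : List (String × List (String × List (Int × Int)))) : Decidable (Spec_get_coords_table coords out) := by unfold Spec_get_coords_table; infer_instance

-- ===== CLAIM (what is proved, stated in full; the proofs are below) =====
def Claim_equal_get_coords_table : Prop := ∀ (coords : List (Int × Int)), Dom_get_coords_table coords → Spec_get_coords_table coords (get_coords_table coords)

-- ===== LEMMAS AND PROOFS =====

-- the pair fold of B is the pair of the two single-dict folds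
theorem pv_fold_pair (l : List (Int × Int))
    (d1 d2 : PySem.Dict Int (List (Int × Int))) :
    l.foldl (fun rc coord =>
        (rc.1.modify coord.2 [] (· ++ [coord]), rc.2.modify coord.1 [] (· ++ [coord]))) (d1, d2)
      = (l.foldl (fun d coord => d.modify coord.2 [] (· ++ [coord])) d1,
         l.foldl (fun d coord => d.modify coord.1 [] (· ++ [coord])) d2) := by
  induction l generalizing d1 d2 with
  | nil => rfl
  | cons c t ih => simp [List.foldl_cons, ih]

-- the row bucket at y is the subsequence of the coords with second component y
theorem pv_rows_getD (l : List (Int × Int)) (d : PySem.Dict Int (List (Int × Int))) (y : Int) :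
    (l.foldl (fun d coord => d.modify coord.2 [] (· ++ [coord])) d).getD y []
      = d.getD y [] ++ l.filter (fun c => c.2 == y) := by
  induction l generalizing d with
  | nil => simp
  | cons c t ih =>
    rw [List.foldl_cons, ih, PySem.Dict.getD_modify]
    by_cases h : y = c.2
    · simp [h, List.append_assoc]
    · simp [h, Ne.symm h, beq_iff_eq]

-- the column bucket at x is the subsequence of the coords with first component x
theorem pv_cols_getD (l : List (Int × Int)) (d : PySem.Dict Int (List (Int × Int))) (x : Int) :
    (l.foldl (fun d coord => d.modify coord.1 [] (· ++ [coord])) d).getD x []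
      = d.getD x [] ++ l.filter (fun c => c.1 == x) := by
  induction l generalizing d with
  | nil => simp
  | cons c t ih =>
    rw [List.foldl_cons, ih, PySem.Dict.getD_modify]
    by_cases h : x = c.1
    · simp [h, List.append_assoc]
    · simp [h, Ne.symm h, beq_iff_eq]

-- the inner all-pairs loop of A produces the four direction filters
theorem pv_innerA (x y : Int) (l : List (Int × Int)) (a b cc e : List (Int × Int)) :
    l.foldl (fun d coord2 =>
        match get_coords_direction (x, y) coord2 with
        | some dir => if d.contains dir then d.modify dir [] (· ++ [coord2]) else d
        | none => d)
      (PySem.Dict.mk [("up", a), ("right", b), ("down", cc), ("left", e)])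
    = PySem.Dict.mk
        [("up", a ++ l.filter (fun c => c.1 == x && decide (c.2 > y))),
         ("right", b ++ l.filter (fun c => c.2 == y && decide (c.1 > x))),
         ("down", cc ++ l.filter (fun c => c.1 == x && decide (c.2 < y))),
         ("left", e ++ l.filter (fun c => c.2 == y && decide (c.1 < x)))] := by
  induction l generalizing a b cc e with
  | nil => simp
  | cons c t ih =>
    rw [List.foldl_cons]
    by_cases hy : c.2 = y
    · by_cases hxgt : c.1 > x
      · have : get_coords_direction (x, y) c = some "right" := by
          simp [get_coords_direction, hy, hxgt]
        simp only [this]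
        simp only [List.filter_cons]
        rw [show ((PySem.Dict.mk [("up", a), ("right", b), ("down", cc), ("left", e)]).contains "right") = true by rfl,
          if_pos rfl]
        rw [show ((PySem.Dict.mk [("up", a), ("right", b), ("down", cc), ("left", e)]).modify "right" [] (· ++ [c]))
            = PySem.Dict.mk [("up", a), ("right", b ++ [c]), ("down", cc), ("left", e)] by
          simp [PySem.Dict.modify, PySem.Dict.insert, PySem.Dict.get?, PySem.Dict.getD, PySem.Dict.contains]]
        rw [ih]
        have h1 : (c.1 == x && decide (c.2 > y)) = false := by simp [hy]
        have h2 : (c.2 == y && decide (c.1 > x)) = true := by simp [hy, hxgt]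
        have h3 : (c.1 == x && decide (c.2 < y)) = false := by simp [hy]
        have h4 : (c.2 == y && decide (c.1 < x)) = false := by simp [hy]; omega
        simp [h1, h2, h3, h4]
      · by_cases hxlt : c.1 < x
        · have : get_coords_direction (x, y) c = some "left" := by
            simp [get_coords_direction, hy, hxgt, hxlt]
          simp only [this]
          simp only [List.filter_cons]
          rw [show ((PySem.Dict.mk [("up", a), ("right", b), ("down", cc), ("left", e)]).contains "left") = true by rfl,
            if_pos rfl]
          rw [show ((PySem.Dict.mk [("up", a), ("right", b), ("down", cc), ("left", e)]).modify "left" [] (· ++ [c]))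
              = PySem.Dict.mk [("up", a), ("right", b), ("down", cc), ("left", e ++ [c])] by
            simp [PySem.Dict.modify, PySem.Dict.insert, PySem.Dict.get?, PySem.Dict.getD, PySem.Dict.contains]]
          rw [ih]
          have h1 : (c.1 == x && decide (c.2 > y)) = false := by simp [hy]
          have h2 : (c.2 == y && decide (c.1 > x)) = false := by simp [hy, hxgt]
          have h3 : (c.1 == x && decide (c.2 < y)) = false := by simp [hy]
          have h4 : (c.2 == y && decide (c.1 < x)) = true := by simp [hy, hxlt]
          simp [h1, h2, h3, h4]
        · have hx : c.1 = x := by omega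
          have : get_coords_direction (x, y) c = none := by
            simp [get_coords_direction, hy, hxgt, hxlt]
          simp only [this]
          rw [ih]
          have h1 : (c.1 == x && decide (c.2 > y)) = false := by simp [hx]; omega
          have h2 : (c.2 == y && decide (c.1 > x)) = false := by simp [hy]; omega
          have h3 : (c.1 == x && decide (c.2 < y)) = false := by simp [hx]; omega
          have h4 : (c.2 == y && decide (c.1 < x)) = false := by simp [hy]; omega
          simp [h1, h2, h3, h4]
    · by_cases hx : c.1 = x
      · by_cases hygt : c.2 > y
        · have : get_coords_direction (x, y) c = some "up" := by
            simp [get_coords_direction, hy, hx, hygt]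
          simp only [this]
          simp only [List.filter_cons]
          rw [show ((PySem.Dict.mk [("up", a), ("right", b), ("down", cc), ("left", e)]).contains "up") = true by rfl,
            if_pos rfl]
          rw [show ((PySem.Dict.mk [("up", a), ("right", b), ("down", cc), ("left", e)]).modify "up" [] (· ++ [c]))
              = PySem.Dict.mk [("up", a ++ [c]), ("right", b), ("down", cc), ("left", e)] by
            simp [PySem.Dict.modify, PySem.Dict.insert, PySem.Dict.get?, PySem.Dict.getD, PySem.Dict.contains]]
          rw [ih]
          have h1 : (c.1 == x && decide (c.2 > y)) = true := by simp [hx, hygt]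
          have h2 : (c.2 == y && decide (c.1 > x)) = false := by simp [hy]
          have h3 : (c.1 == x && decide (c.2 < y)) = false := by simp [hx]; omega
          have h4 : (c.2 == y && decide (c.1 < x)) = false := by simp [hy]
          simp [h1, h2, h3, h4]
        · have hylt : c.2 < y := by omega
          have : get_coords_direction (x, y) c = some "down" := by
            simp [get_coords_direction, hy, hx, hygt, hylt]
          simp only [this]
          simp only [List.filter_cons]
          rw [show ((PySem.Dict.mk [("up", a), ("right", b), ("down", cc), ("left", e)]).contains "down") = true by rfl,
            if_pos rfl]
          rw [show ((PySem.Dict.mk [("up", a), ("right", b), ("down", cc), ("left", e)]).modify "down" [] (· ++ [c]))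
              = PySem.Dict.mk [("up", a), ("right", b), ("down", cc ++ [c]), ("left", e)] by
            simp [PySem.Dict.modify, PySem.Dict.insert, PySem.Dict.get?, PySem.Dict.getD, PySem.Dict.contains]]
          rw [ih]
          have h1 : (c.1 == x && decide (c.2 > y)) = false := by simp [hx]; omega
          have h2 : (c.2 == y && decide (c.1 > x)) = false := by simp [hy]
          have h3 : (c.1 == x && decide (c.2 < y)) = true := by simp [hx, hylt]
          have h4 : (c.2 == y && decide (c.1 < x)) = false := by simp [hy]
          simp [h1, h2, h3, h4]
      · have : get_coords_direction (x, y) c = some "" := by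
          simp [get_coords_direction, hy, hx]
        simp only [this]
        rw [show ((PySem.Dict.mk [("up", a), ("right", b), ("down", cc), ("left", e)]).contains "") = false by rfl,
          if_neg (by simp)]
        rw [ih]
        have h1 : (c.1 == x && decide (c.2 > y)) = false := by simp [hx]
        have h2 : (c.2 == y && decide (c.1 > x)) = false := by simp [hy]
        have h3 : (c.1 == x && decide (c.2 < y)) = false := by simp [hx]
        have h4 : (c.2 == y && decide (c.1 < x)) = false := by simp [hy]
        simp [h1, h2, h3, h4]

-- B's dict literal with four distinct keys, as a Dict
theorem pv_ofList4 (a b cc e : List (Int × Int)) :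
    PySem.Dict.ofList [("up", a), ("right", b), ("down", cc), ("left", e)]
      = PySem.Dict.mk [("up", a), ("right", b), ("down", cc), ("left", e)] := by
  simp [PySem.Dict.ofList, PySem.Dict.update, PySem.Dict.insert, PySem.Dict.contains, PySem.Dict.empty]

-- the two per-coord values agree
theorem pv_value_eq (coords : List (Int × Int)) (c : Int × Int) :
    (PySem.Dict.ofList
        [("up", ((coords.foldl (fun d coord => d.modify coord.1 [] (· ++ [coord])) PySem.Dict.empty).getD c.1 []).filter (fun p => decide (p.2 > c.2))),
         ("right", ((coords.foldl (fun d coord => d.modify coord.2 [] (· ++ [coord])) PySem.Dict.empty).getD c.2 []).filter (fun p => decide (p.1 > c.1))),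
         ("down", ((coords.foldl (fun d coord => d.modify coord.1 [] (· ++ [coord])) PySem.Dict.empty).getD c.1 []).filter (fun p => decide (p.2 < c.2))),
         ("left", ((coords.foldl (fun d coord => d.modify coord.2 [] (· ++ [coord])) PySem.Dict.empty).getD c.2 []).filter (fun p => decide (p.1 < c.1)))])
    = coords.foldl (fun d coord2 =>
        match get_coords_direction c coord2 with
        | some dir => if d.contains dir then d.modify dir [] (· ++ [coord2]) else d
        | none => d)
      (PySem.Dict.ofList [("up", []), ("right", []), ("down", []), ("left", [])]) := by
  obtain ⟨x, y⟩ := c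
  rw [show (PySem.Dict.ofList [("up", ([] : List (Int × Int))), ("right", []), ("down", []), ("left", [])])
      = PySem.Dict.mk [("up", []), ("right", []), ("down", []), ("left", [])] from rfl]
  rw [pv_innerA, pv_ofList4, pv_rows_getD, pv_cols_getD]
  simp only [PySem.Dict.getD_empty, List.nil_append, List.filter_filter]
  have e : ∀ (p q : Int × Int → Bool),
      coords.filter (fun c => p c && q c) = coords.filter (fun c => q c && p c) :=
    fun p q => List.filter_congr (fun c _ => Bool.and_comm _ _)
  rw [e (fun c => decide (c.2 > y)), e (fun c => decide (c.1 > x)),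
    e (fun c => decide (c.2 < y)), e (fun c => decide (c.1 < x))]

-- ===== VERDICT (by name: the statement is the Claim_ definition above) =====
theorem get_coords_table_spec : Claim_equal_get_coords_table := by
  intro coords _
  show get_coords_table coords = get_coords_table_alt coords
  unfold get_coords_table get_coords_table_alt
  simp only [pv_fold_pair]
  congr 2
  apply List.foldl_ext
  intro table c _
  rw [← pv_value_eq coords c]
  rfl
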